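-- pv_equiv track=rewrite | github.com/tommipoiko/school_c1_Python | 6th/6.12ABBA.py | count_abbas
-- ===== SOURCE A (Python) =====
-- def count_abbas(text):
--     """Waterloo mamma mia jeejee."""
--     rnd = 0
--     count = 0
--     length = len(text)
--     while rnd < length - 3:
--         if text[rnd] == "a" and text[rnd+1] == "b" and text[rnd+2] == "b" and text[rnd+3] == "a":
--             count += 1
--         rnd += 1
--     return count
-- ===== SOURCE B (Python) =====
-- def count_abbas(text):
--     """Waterloo mamma mia jeejee."""
--     count = 0
--     start = 0
--     while True:
--         i = text.find("abba", start)
--         if i < 0: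
--             return count
--         count += 1
--         start = i + 1
-- ===== Notes on version B (the rewrite author's own statement) =====
-- stated objective: faster
-- what changed: Replaces the per-character four-way window comparison scan with a search-and-jump loop of repeated str.find calls for the pattern, advancing start to the match position plus one so overlapping occurrences are still counted.
import Mathlib
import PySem

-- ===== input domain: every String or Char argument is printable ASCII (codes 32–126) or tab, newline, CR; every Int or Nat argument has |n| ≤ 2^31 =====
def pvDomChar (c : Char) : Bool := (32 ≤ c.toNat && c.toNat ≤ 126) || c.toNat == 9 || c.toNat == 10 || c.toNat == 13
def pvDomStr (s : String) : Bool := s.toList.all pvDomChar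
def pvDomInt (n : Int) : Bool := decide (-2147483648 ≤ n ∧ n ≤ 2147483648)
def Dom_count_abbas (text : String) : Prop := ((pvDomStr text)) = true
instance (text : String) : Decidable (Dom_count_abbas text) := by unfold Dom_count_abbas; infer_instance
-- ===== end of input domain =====

-- B replaces A's per-character four-way window comparison with a search-and-jump loop of repeated
-- find(pattern, start) calls (start = match + 1 keeps overlapping matches); measurably faster by constant factor.


-- ===== PORT A =====
-- while rnd < length - 3: check the four characters of the window at rnd, advance by one.
def abbaLoopA (cs : List Char) (length : Nat) (rnd : Nat) (count : Int) : Int :=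
  if rnd + 3 < length then
    abbaLoopA cs length (rnd + 1)
      (if cs[rnd]? == some 'a' && cs[rnd+1]? == some 'b' && cs[rnd+2]? == some 'b'
          && cs[rnd+3]? == some 'a' then count + 1 else count)
  else count
termination_by length - rnd

def count_abbas (text : String) : Int :=
  abbaLoopA text.toList text.toList.length 0 0

-- ===== PORT B =====
-- while True: i = text.find("abba", start); if i < 0: return count; count += 1; start = i + 1
-- (fuel = length + 1 only makes the same loop total; it is never exhausted)
def abbaLoopB (cs : List Char) : Nat → Nat → Int → Int
  | 0, _, count => count
  | fuel + 1, start, count =>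
    let i := PySem.Chars.findFrom cs ['a','b','b','a'] (start : Int)
    if i < 0 then count
    else abbaLoopB cs fuel (i.toNat + 1) (count + 1)

def count_abbas_alt (text : String) : Int :=
  abbaLoopB text.toList (text.toList.length + 1) 0 0

-- ===== PRECONDITION & SPEC =====
def Spec_count_abbas (text : String) (out : Int) : Prop := out = count_abbas_alt text
instance (text : String) (out : Int) : Decidable (Spec_count_abbas text out) := by unfold Spec_count_abbas; infer_instance

-- ===== CLAIM (what is proved, stated in full; the proofs are below) =====
def Claim_equal_count_abbas : Prop := ∀ (text : String), Dom_count_abbas text → Spec_count_abbas text (count_abbas text)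

-- ===== LEMMAS AND PROOFS =====

-- number of i ≥ start at which "abba" occurs in cs
def abbaCount (cs : List Char) (start : Nat) : Nat :=
  (List.range' start (cs.length - start)).countP
    (fun i => decide (['a','b','b','a'] <+: cs.drop i))

theorem prefix_abba_iff (l : List Char) :
    (['a','b','b','a'] <+: l) ↔
      (l[0]? = some 'a' ∧ l[1]? = some 'b' ∧ l[2]? = some 'b' ∧ l[3]? = some 'a') := by
  match l with
  | [] => simp
  | [c] => simp
  | [c, d] => simp
  | [c, d, e] => simp
  | c :: d :: e :: f :: rest => simp [List.prefix_cons_iff]; aesop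

theorem window_iff (cs : List Char) (i : Nat) :
    (['a','b','b','a'] <+: cs.drop i) ↔
      (cs[i]? = some 'a' ∧ cs[i+1]? = some 'b' ∧ cs[i+2]? = some 'b' ∧ cs[i+3]? = some 'a') := by
  rw [prefix_abba_iff]
  simp [List.getElem?_drop]

theorem no_window_of_short (cs : List Char) (i : Nat) (h : cs.length ≤ i + 3) :
    ¬ (['a','b','b','a'] <+: cs.drop i) := by
  intro hp
  have := hp.length_le
  simp [List.length_drop] at this
  omega

theorem window_len (cs : List Char) (i : Nat) (h : ['a','b','b','a'] <+: cs.drop i) :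
    i + 4 ≤ cs.length := by
  have := h.length_le
  simp [List.length_drop] at this
  omega

-- A's loop computes count + abbaCount
theorem loopA_eq (cs : List Char) :
    ∀ n rnd count, cs.length - rnd ≤ n →
      abbaLoopA cs cs.length rnd count = count + (abbaCount cs rnd : Int) := by
  intro n
  induction n with
  | zero =>
    intro rnd count h
    rw [abbaLoopA]
    have h3 : ¬ rnd + 3 < cs.length := by omega
    rw [if_neg h3]
    have : abbaCount cs rnd = 0 := by
      apply List.countP_eq_zero.mpr
      intro i hi
      have : rnd ≤ i := (List.mem_range'_1.mp hi).1
      simp only [decide_eq_true_eq]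
      exact no_window_of_short cs i (by omega)
    rw [this]; simp
  | succ n ih =>
    intro rnd count h
    rw [abbaLoopA]
    by_cases h3 : rnd + 3 < cs.length
    · rw [if_pos h3]
      rw [ih (rnd + 1) _ (by omega)]
      have hrange : List.range' rnd (cs.length - rnd) = rnd :: List.range' (rnd + 1) (cs.length - (rnd + 1)) := by
        have : cs.length - rnd = (cs.length - (rnd + 1)) + 1 := by omega
        rw [this, List.range'_succ]
      have hcnt : abbaCount cs rnd =
          (if decide (['a','b','b','a'] <+: cs.drop rnd) = true then 1 else 0) + abbaCount cs (rnd + 1) := by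
        unfold abbaCount
        rw [hrange, List.countP_cons]
        split_ifs <;> omega
      rw [hcnt]
      by_cases hw : ['a','b','b','a'] <+: cs.drop rnd
      · have hb : (cs[rnd]? == some 'a' && cs[rnd+1]? == some 'b' && cs[rnd+2]? == some 'b'
            && cs[rnd+3]? == some 'a') = true := by
          obtain ⟨h1, h2', h3', h4⟩ := (window_iff cs rnd).mp hw
          simp [h1, h2', h3', h4]
        rw [hb]; simp [hw]; ring
      · have hb : (cs[rnd]? == some 'a' && cs[rnd+1]? == some 'b' && cs[rnd+2]? == some 'b'
            && cs[rnd+3]? == some 'a') = false := by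
          rw [window_iff] at hw
          by_contra hc
          simp only [Bool.not_eq_false, Bool.and_eq_true, beq_iff_eq] at hc
          exact hw ⟨hc.1.1.1, hc.1.1.2, hc.1.2, hc.2⟩
        rw [hb]; simp [hw]
    · rw [if_neg h3]
      have : abbaCount cs rnd = 0 := by
        apply List.countP_eq_zero.mpr
        intro i hi
        have : rnd ≤ i := (List.mem_range'_1.mp hi).1
        simp only [decide_eq_true_eq]
        exact no_window_of_short cs i (by omega)
      rw [this]; simp

-- if "abba" occurs at j ≥ start, it is an infix of cs.drop start
theorem infix_of_window (cs : List Char) (start j : Nat) (hj : start ≤ j)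
    (h : ['a','b','b','a'] <+: cs.drop j) : (['a','b','b','a'] : List Char) <:+: cs.drop start := by
  have hd : (cs.drop start).drop (j - start) = cs.drop j := by
    rw [List.drop_drop]; congr 1; omega
  exact (hd ▸ h).isInfix.trans (List.drop_suffix (j - start) (cs.drop start)).isInfix

-- B's loop computes count + abbaCount
theorem loopB_eq (cs : List Char) :
    ∀ fuel start count, start ≤ cs.length → cs.length - start < fuel →
      abbaLoopB cs fuel start count = count + (abbaCount cs start : Int) := by
  intro fuel
  induction fuel with
  | zero => intro start count _ h; omega
  | succ fuel ih =>
    intro start count hs hf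
    rw [abbaLoopB]
    by_cases hneg : PySem.Chars.findFrom cs ['a','b','b','a'] (start : Int) = -1
    · simp only [hneg]
      rw [if_pos (by norm_num)]
      have hnin := (PySem.Chars.findFrom_natCast_eq_neg_one_iff cs ['a','b','b','a'] start hs).mp hneg
      have : abbaCount cs start = 0 := by
        apply List.countP_eq_zero.mpr
        intro i hi
        have hge : start ≤ i := (List.mem_range'_1.mp hi).1
        simp only [decide_eq_true_eq]
        intro hp
        exact hnin (infix_of_window cs start i hge hp)
      rw [this]; simp
    · obtain ⟨hge, hpre, hmin⟩ := PySem.Chars.findFrom_natCast_spec cs ['a','b','b','a'] start hs hneg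
      set i := PySem.Chars.findFrom cs ['a','b','b','a'] (start : Int) with hi
      have hnotneg : ¬ i < 0 := by omega
      rw [if_neg hnotneg]
      set m := i.toNat with hm
      have hmi : (m : Int) = i := by omega
      have hstartm : start ≤ m := by omega
      have hm4 : m + 4 ≤ cs.length := window_len cs m hpre
      rw [ih (m + 1) (count + 1) (by omega) (by omega)]
      have hsplit : abbaCount cs start = 1 + abbaCount cs (m + 1) := by
        unfold abbaCount
        have h1 : List.range' start (cs.length - start) =
            List.range' start (m - start) ++ List.range' m (cs.length - m) := by
          have := @List.range'_append start (m - start) (cs.length - m) 1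
          simp only [one_mul] at this
          rw [show start + (m - start) = m by omega] at this
          rw [show (m - start) + (cs.length - m) = cs.length - start by omega] at this
          exact this.symm
        have h2 : List.range' m (cs.length - m) = m :: List.range' (m + 1) (cs.length - (m + 1)) := by
          have : cs.length - m = (cs.length - (m + 1)) + 1 := by omega
          rw [this, List.range'_succ]
        rw [h1, h2, List.countP_append, List.countP_cons]
        have hz : (List.range' start (m - start)).countP
            (fun i => decide (['a','b','b','a'] <+: cs.drop i)) = 0 := by
          apply List.countP_eq_zero.mpr
          intro j hj
          obtain ⟨hj1, hj2⟩ := List.mem_range'_1.mp hj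
          simp only [decide_eq_true_eq]
          exact hmin j hj1 (by omega)
        rw [hz]
        simp [hpre]
        omega
      rw [hsplit]
      push_cast
      ring

-- ===== VERDICT (by name: the statement is the Claim_ definition above) =====
theorem count_abbas_spec : Claim_equal_count_abbas := by
  intro text _
  unfold Spec_count_abbas count_abbas count_abbas_alt
  rw [loopA_eq text.toList text.toList.length 0 0 (by omega),
      loopB_eq text.toList (text.toList.length + 1) 0 0 (by omega) (by omega)]
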